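-- pv_equiv track=rewrite | github.com/mayowaibi/leetcode-practice | 2497-maximum-matching-of-players-with-trainers/maximum-matching-of-players-with-trainers.py | matchPlayersAndTrainers2
-- ===== SOURCE A (Python) =====
-- from typing import List
--
-- def matchPlayersAndTrainers2(players: List[int], trainers: List[int]) -> int:
--     res = 0
--
--     for i in range(len(players)):
--         for j in range(len(trainers)):
--             if players[i] <= trainers[j]:
--                 res += 1
--                 trainers[j] = 0
--                 break
--
--     return res
-- ===== SOURCE B (Python) =====
-- from typing import List
--
-- # Max-segment-tree (built as a recursive half-split tree over the trainers list):
-- # for each player, descend to the leftmost leaf whose value >= player, zero it out.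
-- # Note: A mutates its trainers argument in place (zeroing used trainers); B does not
-- # mutate its arguments -- the equivalence is about the return value.
--
-- def matchPlayersAndTrainers2(players: List[int], trainers: List[int]) -> int:
--     if not trainers:
--         return 0
--
--     def build(ts):
--         # node = [max, left, right]; leaf = [value]
--         if len(ts) == 1:
--             return [ts[0]]
--         k = len(ts) // 2
--         l = build(ts[:k])
--         r = build(ts[k:])
--         return [max(l[0], r[0]), l, r]
--
--     def match(p, t):
--         # returns the updated tree with the leftmost leaf >= p zeroed, or None
--         if t[0] < p:
--             return None
--         if len(t) == 1:
--             return [0]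
--         nl = match(p, t[1])
--         if nl is not None:
--             return [max(nl[0], t[2][0]), nl, t[2]]
--         nr = match(p, t[2])
--         if nr is None:
--             return None
--         return [max(t[1][0], nr[0]), t[1], nr]
--
--     root = build(trainers)
--     res = 0
--     for p in players:
--         nt = match(p, root)
--         if nt is not None:
--             res += 1
--             root = nt
--     return res
-- ===== Notes on version B (the rewrite author's own statement) =====
-- stated objective: faster
-- what changed: Replaces the per-player linear scan of trainers with a max-segment tree built once over the trainers: each player descends to the leftmost leaf >= player and zeroes it, turning the inner scan into an O(log m) descent.
import Mathlib
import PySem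

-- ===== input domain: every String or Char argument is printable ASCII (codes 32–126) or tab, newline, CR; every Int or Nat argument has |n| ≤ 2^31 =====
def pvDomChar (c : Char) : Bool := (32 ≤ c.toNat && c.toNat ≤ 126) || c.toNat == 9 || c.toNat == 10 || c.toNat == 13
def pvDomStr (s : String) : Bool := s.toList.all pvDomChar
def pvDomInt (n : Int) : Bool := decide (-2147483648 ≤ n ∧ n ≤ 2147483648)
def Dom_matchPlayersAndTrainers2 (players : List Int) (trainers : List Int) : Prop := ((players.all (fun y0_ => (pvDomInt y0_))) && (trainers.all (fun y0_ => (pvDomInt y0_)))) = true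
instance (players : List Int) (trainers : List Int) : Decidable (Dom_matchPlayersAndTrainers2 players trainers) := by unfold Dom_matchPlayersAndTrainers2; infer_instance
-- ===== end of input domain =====

-- B replaces A's per-player linear scan of trainers by a max-segment tree (leftmost
-- leaf ≥ player, zeroed on use); equivalence is about the RETURN value only: A
-- mutates its trainers argument in place (zeroing used trainers), B does not.

-- ===== PORT A =====
-- inner 'for j in range(len(trainers)): if players[i] <= trainers[j]: res += 1; trainers[j] = 0; break'
def innerA (p : Int) (ts : List Int) (j : Nat) : Int × List Int :=
  if h : j < ts.length then
    if p ≤ ts[j] then (1, ts.set j 0)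
    else innerA p ts (j + 1)
  else (0, ts)
termination_by ts.length - j

def matchPlayersAndTrainers2 (players : List Int) (trainers : List Int) : Int :=
  ((PySem.List.pyRange 0 (players.length : Int) 1).foldl
    (fun st i =>
      (fun st p => (st.1 + (innerA p st.2 0).1, (innerA p st.2 0).2)) st
        (PySem.List.pyGetD players i 0))
    ((0 : Int), trainers)).1

-- ===== PORT B =====
inductive Tr where
  | leaf : Int → Tr
  | node : Int → Tr → Tr → Tr
deriving DecidableEq, Repr

def Tr.mx : Tr → Int
  | .leaf v => v
  | .node m _ _ => m

def buildT : List Int → Tr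
  | [] => .leaf 0   -- unreachable: the caller handles empty trainers
  | [x] => .leaf x
  | x :: y :: rest =>
      let l := buildT ((x :: y :: rest).take ((x :: y :: rest).length / 2))
      let r := buildT ((x :: y :: rest).drop ((x :: y :: rest).length / 2))
      .node (max l.mx r.mx) l r
termination_by ts => ts.length
decreasing_by
  · simp [List.length_take]; omega
  · simp; omega

def quB (p : Int) : Tr → Option Tr
  | .leaf v => if v < p then none else some (.leaf 0)
  | .node m l r =>
      if m < p then none
      else
        match quB p l with
        | some nl => some (.node (max nl.mx r.mx) nl r)
        | none =>
          match quB p r with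
          | some nr => some (.node (max l.mx nr.mx) l nr)
          | none => none

def matchPlayersAndTrainers2_alt (players : List Int) (trainers : List Int) : Int :=
  if trainers = [] then 0
  else
    (players.foldl
      (fun (st : Int × Tr) p =>
        match quB p st.2 with
        | some nt => (st.1 + 1, nt)
        | none => st)
      ((0 : Int), buildT trainers)).1

-- ===== PRECONDITION & SPEC =====
def Spec_matchPlayersAndTrainers2 (players : List Int) (trainers : List Int) (out : Int) : Prop := out = matchPlayersAndTrainers2_alt players trainers
instance (players : List Int) (trainers : List Int) (out : Int) : Decidable (Spec_matchPlayersAndTrainers2 players trainers out) := by unfold Spec_matchPlayersAndTrainers2; infer_instance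

-- ===== CLAIM (what is proved, stated in full; the proofs are below) =====
def Claim_equal_matchPlayersAndTrainers2 : Prop := ∀ (players : List Int) (trainers : List Int), Dom_matchPlayersAndTrainers2 players trainers → Spec_matchPlayersAndTrainers2 players trainers (matchPlayersAndTrainers2 players trainers)

-- ===== LEMMAS AND PROOFS =====

-- first-fit on a plain list: the specification both loops are reduced to
def ff (p : Int) : List Int → Int × List Int
  | [] => (0, [])
  | t :: rest =>
      if p ≤ t then (1, 0 :: rest)
      else ((ff p rest).1, t :: (ff p rest).2)

def Tr.toL : Tr → List Int
  | .leaf v => [v]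
  | .node _ l r => l.toL ++ r.toL

def wfT : Tr → Prop
  | .leaf _ => True
  | .node m l r => wfT l ∧ wfT r ∧ m = max l.mx r.mx

def ffStep (st : Int × List Int) (p : Int) : Int × List Int :=
  (st.1 + (ff p st.2).1, (ff p st.2).2)

def bStep (st : Int × Tr) (p : Int) : Int × Tr :=
  match quB p st.2 with
  | some nt => (st.1 + 1, nt)
  | none => st

theorem innerA_eq_ff (p : Int) (ts : List Int) (j : Nat) :
    innerA p ts j = ((ff p (ts.drop j)).1, ts.take j ++ (ff p (ts.drop j)).2) := by
  by_cases h : j < ts.length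
  · rw [innerA, dif_pos h]
    have hdrop : ts.drop j = ts[j] :: ts.drop (j + 1) := List.drop_eq_getElem_cons h
    by_cases hp : p ≤ ts[j]
    · rw [if_pos hp, hdrop, List.set_eq_take_cons_drop 0 h]
      simp only [ff, if_pos hp]
    · rw [if_neg hp, hdrop]
      rw [innerA_eq_ff p ts (j + 1)]
      have htake : ts.take (j + 1) = ts.take j ++ [ts[j]] := by
        rw [List.take_add_one]
        simp [h]
      simp only [ff, if_neg hp, htake]
      rw [List.append_assoc]
      rfl
  · rw [innerA, dif_neg h]
    have h1 : ts.drop j = [] := List.drop_eq_nil_of_le (by omega)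
    have h2 : ts.take j = ts := List.take_of_length_le (by omega)
    rw [h1, h2]
    simp [ff]
termination_by ts.length - j

theorem toL_buildT (ts : List Int) (h : ts ≠ []) : (buildT ts).toL = ts := by
  induction ts using buildT.induct with
  | case1 => exact absurd rfl h
  | case2 x => simp [buildT, Tr.toL]
  | case3 x y rest ihl ihr =>
    rw [buildT]
    simp only [Tr.toL]
    rw [ihl (by simp [List.take_eq_nil_iff]), ihr (by simp [List.drop_eq_nil_iff]; omega)]
    exact List.take_append_drop _ _

theorem wf_buildT (ts : List Int) : wfT (buildT ts) := by
  induction ts using buildT.induct with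
  | case1 => rw [buildT]; trivial
  | case2 x => rw [buildT]; trivial
  | case3 x y rest ihl ihr =>
    rw [buildT]
    exact ⟨ihl, ihr, rfl⟩

theorem mx_mem (t : Tr) (h : wfT t) : t.mx ∈ t.toL := by
  induction t with
  | leaf v => simp [Tr.mx, Tr.toL]
  | node m l r ihl ihr =>
    obtain ⟨hwl, hwr, hm⟩ := h
    show m ∈ l.toL ++ r.toL
    rw [List.mem_append, hm]
    rcases max_choice l.mx r.mx with he | he <;> rw [he]
    · exact Or.inl (ihl hwl)
    · exact Or.inr (ihr hwr)

theorem mx_ub (t : Tr) (h : wfT t) : ∀ x ∈ t.toL, x ≤ t.mx := by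
  induction t with
  | leaf v => simp [Tr.mx, Tr.toL]
  | node m l r ihl ihr =>
    obtain ⟨hwl, hwr, hm⟩ := h
    intro x hx
    rw [show (Tr.node m l r).toL = l.toL ++ r.toL from rfl, List.mem_append] at hx
    show x ≤ m
    rw [hm]
    rcases hx with hx | hx
    · exact le_max_of_le_left (ihl hwl x hx)
    · exact le_max_of_le_right (ihr hwr x hx)

theorem ff_none (p : Int) (l : List Int) (h : ∀ x ∈ l, x < p) : ff p l = (0, l) := by
  induction l with
  | nil => rfl
  | cons t rest ih =>
    have h1 : ¬ p ≤ t := by have := h t (by simp); omega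
    simp [ff, h1, ih (fun x hx => h x (by simp [hx]))]

theorem ff_fst_one (p : Int) (l : List Int) (h : ∃ x ∈ l, p ≤ x) : (ff p l).1 = 1 := by
  induction l with
  | nil => simp at h
  | cons t rest ih =>
    by_cases hp : p ≤ t
    · simp [ff, hp]
    · have hex : ∃ x ∈ rest, p ≤ x := by
        obtain ⟨x, hx, hpx⟩ := h
        rcases List.mem_cons.mp hx with he | hm
        · exact absurd (he ▸ hpx) hp
        · exact ⟨x, hm, hpx⟩
      simp [ff, hp, ih hex]

theorem ff_append_none (p : Int) (a b : List Int) (h : ∀ x ∈ a, x < p) :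
    ff p (a ++ b) = ((ff p b).1, a ++ (ff p b).2) := by
  induction a with
  | nil => simp
  | cons t rest ih =>
    have h1 : ¬ p ≤ t := by have := h t (by simp); omega
    simp [ff, h1, ih (fun x hx => h x (by simp [hx]))]

theorem ff_append_some (p : Int) (a b : List Int) (h : ∃ x ∈ a, p ≤ x) :
    ff p (a ++ b) = ((ff p a).1, (ff p a).2 ++ b) := by
  induction a with
  | nil => simp at h
  | cons t rest ih =>
    by_cases hp : p ≤ t
    · simp [ff, hp]
    · have hex : ∃ x ∈ rest, p ≤ x := by
        obtain ⟨x, hx, hpx⟩ := h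
        rcases List.mem_cons.mp hx with he | hm
        · exact absurd (he ▸ hpx) hp
        · exact ⟨x, hm, hpx⟩
      simp [ff, hp, ih hex]

theorem quB_none (p : Int) (t : Tr) (h : t.mx < p) : quB p t = none := by
  cases t with
  | leaf v => simp only [Tr.mx] at h; simp [quB, h]
  | node m l r => simp only [Tr.mx] at h; simp [quB, h]

theorem quB_some (p : Int) (t : Tr) (hw : wfT t) (h : p ≤ t.mx) :
    ∃ nt, quB p t = some nt ∧ wfT nt ∧ nt.toL = (ff p t.toL).2 := by
  induction t with
  | leaf v =>
    simp only [Tr.mx] at h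
    refine ⟨.leaf 0, ?_, trivial, ?_⟩
    · simp [quB, show ¬ v < p by omega]
    · simp [Tr.toL, ff, h]
  | node m l r ihl ihr =>
    obtain ⟨hwl, hwr, hm⟩ := hw
    simp only [Tr.mx] at h
    have hnm : ¬ m < p := by omega
    by_cases hl : p ≤ l.mx
    · obtain ⟨nl, hq, hwnl, htl⟩ := ihl hwl hl
      refine ⟨.node (max nl.mx r.mx) nl r, ?_, ⟨hwnl, hwr, rfl⟩, ?_⟩
      · simp [quB, hnm, hq]
      · simp only [Tr.toL]
        rw [ff_append_some p l.toL r.toL ⟨l.mx, mx_mem l hwl, hl⟩, htl]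
    · have hr : p ≤ r.mx := by
        subst hm
        rcases max_choice l.mx r.mx with he | he <;> omega
      obtain ⟨nr, hq, hwnr, htr⟩ := ihr hwr hr
      refine ⟨.node (max l.mx nr.mx) l nr, ?_, ⟨hwl, hwnr, rfl⟩, ?_⟩
      · simp [quB, hnm, quB_none p l (by omega), hq]
      · simp only [Tr.toL]
        rw [ff_append_none p l.toL r.toL (fun x hx => by have := mx_ub l hwl x hx; omega), htr]

theorem loop_eq (ps : List Int) (res : Int) (t : Tr) (ts : List Int)
    (hw : wfT t) (hl : t.toL = ts) :
    (ps.foldl ffStep (res, ts)).1 = (ps.foldl bStep (res, t)).1 := by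
  induction ps generalizing res t ts with
  | nil => simp
  | cons p rest ih =>
    simp only [List.foldl_cons]
    by_cases hp : p ≤ t.mx
    · obtain ⟨nt, hq, hwnt, htl⟩ := quB_some p t hw hp
      have hstep : bStep (res, t) p = (res + 1, nt) := by simp [bStep, hq]
      have hone : (ff p ts).1 = 1 := ff_fst_one p ts ⟨t.mx, hl ▸ mx_mem t hw, hp⟩
      have hstepA : ffStep (res, ts) p = (res + 1, (ff p ts).2) := by simp [ffStep, hone]
      rw [hstep, hstepA]
      exact ih (res + 1) nt (ff p ts).2 hwnt (by rw [htl, hl])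
    · have hmx : t.mx < p := by omega
      have hall : ∀ x ∈ ts, x < p := fun x hx => by
        have := mx_ub t hw x (hl ▸ hx); omega
      have hstep : bStep (res, t) p = (res, t) := by simp [bStep, quB_none p t hmx]
      have hstepA : ffStep (res, ts) p = (res, ts) := by simp [ffStep, ff_none p ts hall]
      rw [hstep, hstepA]
      exact ih res t ts hw hl

theorem loop_nil (ps : List Int) (res : Int) :
    (ps.foldl ffStep (res, ([] : List Int))).1 = res := by
  induction ps generalizing res with
  | nil => rfl
  | cons p rest ih => simpa [ffStep, ff] using ih res

theorem matchA_eq (ps ts : List Int) :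
    matchPlayersAndTrainers2 ps ts = (ps.foldl ffStep (0, ts)).1 := by
  unfold matchPlayersAndTrainers2
  rw [PySem.List.foldl_pyRange_zero_pyGetD' ps 0
    (fun st p => (st.1 + (innerA p st.2 0).1, (innerA p st.2 0).2)) ((0 : Int), ts)]
  congr 1
  apply PySem.List.foldl_congr_mem
  intro st p _
  rw [innerA_eq_ff p st.2 0]
  simp [ffStep]

-- ===== VERDICT (by name: the statement is the Claim_ definition above) =====
theorem matchPlayersAndTrainers2_spec : Claim_equal_matchPlayersAndTrainers2 := by
  intro players trainers _
  show _ = _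
  rw [matchA_eq]
  unfold matchPlayersAndTrainers2_alt
  by_cases h : trainers = []
  · simp only [h]
    exact loop_nil players 0
  · rw [if_neg h]
    have := loop_eq players 0 (buildT trainers) trainers (wf_buildT trainers) (toL_buildT trainers h)
    rw [this]
    rfl
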